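-- pv_equiv track=rewrite | github.com/mpettersson/PythonReview | questions/list/has_k_sum.py | has_k_sum_unoptimized
-- ===== SOURCE A (Python) =====
-- def has_k_sum_unoptimized(l, k, t):
--
--     def _rec(l, low, high, k, t, a):
--         if k == 0 and t == 0:                                   # k == 0:  O(1). Don't need to sort.
--             return True
--         elif k == 1:                                            # k == 1:  O(n). Don't need to sort.
--             return True if t in l else False
--         elif k == 2:                                            # k == 2: Solve 2-sum via two pointers approach.
--             while low < high:
--                 curr_sum = l[low] + l[high]
--                 if curr_sum == t:
--                     return True
--                 elif curr_sum < t: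
--                     low += 1
--                 else:
--                     high -= 1
--         else:                                                   # k >= 3:  Recurse down to k == 2.
--             for i in range(low, high + 1):
--                 if _rec(l, i + 1, high, k - 1, t - l[i], a + [l[i]]):
--                     return True
--         return False
--
--     if isinstance(l, list) and isinstance(k, int) and 0 <= k and isinstance(t, int):
--         l.sort()
--         return _rec(l, 0, len(l)-1, k, t, [])
--     return False
-- ===== SOURCE B (Python) =====
-- def has_k_sum_unoptimized(l, k, t):
--     # Return-value equivalent to A; unlike A it does not sort l in place.
--     if isinstance(l, list) and isinstance(k, int) and 0 <= k and isinstance(t, int):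
--         reachable = {(0, 0)}  # (size, sum) pairs achievable by picking at most k elements seen so far
--         for x in l:
--             reachable |= {(c + 1, s + x) for (c, s) in reachable if c < k}
--         return (k, t) in reachable
--     return False
-- ===== Notes on version B (the rewrite author's own statement) =====
-- stated objective: alternative
-- what changed: Replaces A's sort plus recursive k-sum reduction with a two-pointer 2-sum base case by a single left-to-right dynamic program over the set of reachable (subset-size, subset-sum) pairs; return values are identical everywhere, but B does not sort l in place (A mutates its argument).
import Mathlib
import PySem

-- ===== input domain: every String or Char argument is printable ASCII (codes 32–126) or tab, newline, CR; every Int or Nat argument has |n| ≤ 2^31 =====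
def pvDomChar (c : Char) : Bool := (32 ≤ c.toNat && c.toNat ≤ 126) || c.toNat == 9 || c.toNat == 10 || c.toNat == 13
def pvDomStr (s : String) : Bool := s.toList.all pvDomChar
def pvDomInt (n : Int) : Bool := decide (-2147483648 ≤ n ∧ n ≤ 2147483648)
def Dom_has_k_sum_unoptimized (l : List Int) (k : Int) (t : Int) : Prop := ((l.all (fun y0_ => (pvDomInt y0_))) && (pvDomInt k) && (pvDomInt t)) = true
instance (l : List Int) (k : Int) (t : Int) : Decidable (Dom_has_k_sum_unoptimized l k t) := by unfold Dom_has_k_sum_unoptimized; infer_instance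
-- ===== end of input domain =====

-- B replaces A's sort + recursive k-sum reduction (two-pointer 2-sum base case) by a one-pass
-- dynamic program over the set of reachable (subset-size, subset-sum) pairs; return values are
-- equal everywhere, but unlike A, B does not sort l in place (A mutates its argument).

-- ===== PORT A =====
-- the `while low < high` two-pointer loop of the k == 2 branch
def pvTwoSum (l : List Int) (low high t : Int) : Bool :=
  if low < high then
    let curr_sum := (PySem.List.pyGet? l low).getD 0 + (PySem.List.pyGet? l high).getD 0
    if curr_sum == t then true
    else if curr_sum < t then pvTwoSum l (low + 1) high t
    else pvTwoSum l low (high - 1) t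
  else false
termination_by (high - low).toNat
decreasing_by all_goals omega

mutual
-- _rec
def pvRec (l : List Int) (low high k t : Int) (a : List Int) : Bool :=
  if k == 0 && t == 0 then true
  else if k == 1 then l.contains t
  else if k == 2 then pvTwoSum l low high t
  else pvLoop l low high k t a
termination_by ((high + 1 - low).toNat, 1)
decreasing_by exact Prod.Lex.right _ (by omega)

-- the `for i in range(low, high + 1)` loop of the k >= 3 branch
def pvLoop (l : List Int) (low high k t : Int) (a : List Int) : Bool :=
  if low ≤ high then
    let x := (PySem.List.pyGet? l low).getD 0
    if pvRec l (low + 1) high (k - 1) (t - x) (a ++ [x]) then true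
    else pvLoop l (low + 1) high k t a
  else false
termination_by ((high + 1 - low).toNat, 0)
decreasing_by
  · exact Prod.Lex.left _ _ (by omega)
  · exact Prod.Lex.left _ _ (by omega)
end

def has_k_sum_unoptimized (l : List Int) (k : Int) (t : Int) : Bool :=
  if 0 ≤ k then
    let ls := PySem.List.sorted l (fun x => x) false   -- l.sort() (in-place; return value unaffected)
    pvRec ls 0 ((ls.length : Int) - 1) k t []
  else false

-- ===== PORT B =====
-- reachable |= {(c + 1, s + x) for (c, s) in reachable if c < k}
def pvStep (k : Int) (r : PySem.Set (Int × Int)) (x : Int) : PySem.Set (Int × Int) :=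
  PySem.Set.update r ((r.filter (fun p => decide (p.1 < k))).map (fun p => (p.1 + 1, p.2 + x)))

def has_k_sum_unoptimized_alt (l : List Int) (k : Int) (t : Int) : Bool :=
  if 0 ≤ k then
    let reachable : PySem.Set (Int × Int) := l.foldl (pvStep k) (PySem.Set.ofList [((0 : Int), (0 : Int))])
    PySem.Set.contains reachable (k, t)
  else false

-- ===== PRECONDITION & SPEC =====
def Spec_has_k_sum_unoptimized (l : List Int) (k : Int) (t : Int) (out : Bool) : Prop := out = has_k_sum_unoptimized_alt l k t
instance (l : List Int) (k : Int) (t : Int) (out : Bool) : Decidable (Spec_has_k_sum_unoptimized l k t out) := by unfold Spec_has_k_sum_unoptimized; infer_instance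

-- ===== CLAIM (what is proved, stated in full; the proofs are below) =====
def Claim_equal_has_k_sum_unoptimized : Prop := ∀ (l : List Int) (k : Int) (t : Int), Dom_has_k_sum_unoptimized l k t → Spec_has_k_sum_unoptimized l k t (has_k_sum_unoptimized l k t)

-- ===== LEMMAS AND PROOFS =====

-- "some k elements of xs (at distinct positions) sum to t"
def pvE (xs : List Int) (k t : Int) : Prop :=
  ∃ c : List Int, c.Sublist xs ∧ (c.length : Int) = k ∧ c.sum = t

theorem pvE_of_perm {xs ys : List Int} (h : xs.Perm ys) (k t : Int) (he : pvE xs k t) : pvE ys k t := by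
  obtain ⟨c, hc, hl, hs⟩ := he
  obtain ⟨c', hpc, hc'⟩ := (hc.subperm.trans h.subperm : c.Subperm ys)
  exact ⟨c', hc', by rw [hpc.length_eq, hl], by rw [hpc.sum_eq, hs]⟩

theorem pvE_perm {xs ys : List Int} (h : xs.Perm ys) (k t : Int) : pvE xs k t ↔ pvE ys k t :=
  ⟨pvE_of_perm h k t, pvE_of_perm h.symm k t⟩

theorem pvE_nil (k t : Int) : pvE [] k t ↔ k = 0 ∧ t = 0 := by
  constructor
  · rintro ⟨c, hc, hl, hs⟩
    rw [List.sublist_nil] at hc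
    subst hc
    simp at hl hs
    omega
  · rintro ⟨rfl, rfl⟩
    exact ⟨[], by simp⟩

theorem pvE_cons (x : Int) (xs : List Int) (k t : Int) :
    pvE (x :: xs) k t ↔ pvE xs (k - 1) (t - x) ∨ pvE xs k t := by
  constructor
  · rintro ⟨c, hc, hl, hs⟩
    rw [List.sublist_cons_iff] at hc
    rcases hc with hc | ⟨r, rfl, hr⟩
    · exact Or.inr ⟨c, hc, hl, hs⟩
    · refine Or.inl ⟨r, hr, ?_, ?_⟩ <;> simp at hl hs ⊢ <;> omega
  · rintro (⟨c, hc, hl, hs⟩ | ⟨c, hc, hl, hs⟩)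
    · exact ⟨x :: c, List.cons_sublist_cons.mpr hc, by simp; omega, by simp; omega⟩
    · exact ⟨c, hc.cons _, hl, hs⟩

theorem pvE_one (xs : List Int) (t : Int) : pvE xs 1 t ↔ t ∈ xs := by
  constructor
  · rintro ⟨c, hc, hl, hs⟩
    have : c.length = 1 := by omega
    obtain ⟨y, rfl⟩ := List.length_eq_one_iff.mp this
    rw [List.singleton_sublist] at hc
    simp at hs
    exact hs ▸ hc
  · intro ht
    exact ⟨[t], List.singleton_sublist.mpr ht, by simp, by simp⟩

-- length-2 sublists are index pairs
theorem pvMem_getD (xs : List Int) (y : Int) :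
    y ∈ xs ↔ ∃ m : Nat, m < xs.length ∧ xs.getD m 0 = y := by
  rw [List.mem_iff_getElem]
  constructor
  · rintro ⟨m, hm, rfl⟩
    exact ⟨m, hm, List.getD_eq_getElem _ _ hm⟩
  · rintro ⟨m, hm, hy⟩
    exact ⟨m, hm, by rw [← List.getD_eq_getElem _ _ hm, hy]⟩

theorem pvE_two_iff (xs : List Int) (t : Int) :
    pvE xs 2 t ↔ ∃ i j : Nat, i < j ∧ j < xs.length ∧ xs.getD i 0 + xs.getD j 0 = t := by
  induction xs generalizing t with
  | nil => simp [pvE_nil]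
  | cons x xs ih =>
    rw [pvE_cons]
    have h1 : pvE xs (2 - 1) (t - x) ↔ t - x ∈ xs := by norm_num [pvE_one]
    rw [h1, ih]
    constructor
    · rintro (hm | ⟨i, j, hij, hj, hsum⟩)
      · obtain ⟨m, hm, hy⟩ := (pvMem_getD xs (t - x)).mp hm
        exact ⟨0, m + 1, by omega, by simp; omega, by simp [List.getD] at hy ⊢; omega⟩
      · exact ⟨i + 1, j + 1, by omega, by simp; omega, by simpa using hsum⟩
    · rintro ⟨i, j, hij, hj, hsum⟩
      cases j with
      | zero => omega
      | succ jj =>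
        cases i with
        | zero =>
          refine Or.inl ((pvMem_getD xs (t - x)).mpr ⟨jj, by simp at hj; omega, ?_⟩)
          simp [List.getD] at hsum ⊢
          omega
        | succ ii =>
          refine Or.inr ⟨ii, jj, by omega, by simp at hj; omega, ?_⟩
          simpa using hsum

-- negative k: _rec always falls to the for-loop and returns False
theorem pv_nonpos_aux : ∀ (m : Nat) (l : List Int) (low high k t : Int) (a : List Int),
    (high + 1 - low).toNat ≤ m →
    (k < 0 → pvRec l low high k t a = false) ∧ (k ≤ 0 → pvLoop l low high k t a = false) := by
  intro m
  induction m with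
  | zero =>
    intro l low high k t a hm
    have hlh : ¬ low ≤ high := by omega
    have hloop : pvLoop l low high k t a = false := by rw [pvLoop]; simp [hlh]
    refine ⟨fun hk => ?_, fun _ => hloop⟩
    have e0 : (k == (0 : Int)) = false := by simp; omega
    have e1 : (k == (1 : Int)) = false := by simp; omega
    have e2 : (k == (2 : Int)) = false := by simp; omega
    rw [pvRec]
    simp [e0, e1, e2, hloop]
  | succ n ih =>
    intro l low high k t a hm
    have hloop : k ≤ 0 → pvLoop l low high k t a = false := by
      intro hk
      rw [pvLoop]
      by_cases hlh : low ≤ high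
      · have h1 : pvRec l (low + 1) high (k - 1) (t - (PySem.List.pyGet? l low).getD 0)
            (a ++ [(PySem.List.pyGet? l low).getD 0]) = false :=
          (ih l (low + 1) high (k - 1) _ _ (by omega)).1 (by omega)
        have h2 : pvLoop l (low + 1) high k t a = false :=
          (ih l (low + 1) high k t a (by omega)).2 hk
        simp [hlh, h1, h2]
      · simp [hlh]
    refine ⟨fun hk => ?_, hloop⟩
    have e0 : (k == (0 : Int)) = false := by simp; omega
    have e1 : (k == (1 : Int)) = false := by simp; omega
    have e2 : (k == (2 : Int)) = false := by simp; omega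
    rw [pvRec]
    simp [e0, e1, e2, hloop (le_of_lt hk)]

theorem pvLoop_nonpos (l : List Int) (low high k t : Int) (a : List Int) (hk : k ≤ 0) :
    pvLoop l low high k t a = false :=
  (pv_nonpos_aux (high + 1 - low).toNat l low high k t a le_rfl).2 hk

-- two-pointer 2-sum correctness on a sorted list
theorem pvSorted_getD_mono (l : List Int) (hs : l.Pairwise (· ≤ ·)) (p q : Nat)
    (hpq : p ≤ q) (hq : q < l.length) : l.getD p 0 ≤ l.getD q 0 := by
  rcases eq_or_lt_of_le hpq with rfl | h
  · exact le_refl _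
  · have := List.pairwise_iff_getElem.mp hs p q (by omega) hq h
    rw [List.getD_eq_getElem _ _ (by omega : p < l.length), List.getD_eq_getElem _ _ hq]
    exact this

theorem pvTwoSum_step (l : List Int) (low high t : Int) (h : low < high)
    (hlow : 0 ≤ low) (hhigh2 : 0 ≤ high) :
    pvTwoSum l low high t =
      (if l.getD low.toNat 0 + l.getD high.toNat 0 = t then true
       else if l.getD low.toNat 0 + l.getD high.toNat 0 < t then pvTwoSum l (low + 1) high t
       else pvTwoSum l low (high - 1) t) := by
  rw [pvTwoSum, if_pos h]
  simp only [PySem.List.pyGet?_of_nonneg l hlow, PySem.List.pyGet?_of_nonneg l hhigh2,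
    ← List.getD_eq_getElem?_getD]
  simp

theorem pvTwoSum_iff (l : List Int) (hs : l.Pairwise (· ≤ ·)) (low high t : Int)
    (hlow : 0 ≤ low) (hhigh : high < (l.length : Int)) :
    pvTwoSum l low high t = true ↔
      ∃ i j : Nat, low ≤ (i : Int) ∧ i < j ∧ (j : Int) ≤ high ∧ l.getD i 0 + l.getD j 0 = t := by
  have main : ∀ (m : Nat) (low high : Int), (high - low).toNat ≤ m → 0 ≤ low →
      high < (l.length : Int) →
      (pvTwoSum l low high t = true ↔
        ∃ i j : Nat, low ≤ (i : Int) ∧ i < j ∧ (j : Int) ≤ high ∧ l.getD i 0 + l.getD j 0 = t) := by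
    intro m
    induction m with
    | zero =>
      intro low high hm hlow hhigh
      have hlt : ¬ low < high := by omega
      rw [pvTwoSum, if_neg hlt]
      simp only [Bool.false_eq_true, false_iff]
      rintro ⟨i, j, h1, h2, h3, _⟩
      omega
    | succ n ih =>
      intro low high hm hlow hhigh
      by_cases hlt : low < high
      · have hi0 : low.toNat < l.length := by omega
        have hj0 : high.toNat < l.length := by omega
        by_cases heq : l.getD low.toNat 0 + l.getD high.toNat 0 = t
        · have hT : pvTwoSum l low high t = true := by
            rw [pvTwoSum_step l low high t hlt hlow (by omega), if_pos heq]
          rw [hT]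
          simp only [true_iff]
          exact ⟨low.toNat, high.toNat, by omega, by omega, by omega, heq⟩
        · by_cases hlt2 : l.getD low.toNat 0 + l.getD high.toNat 0 < t
          · have hrw : pvTwoSum l low high t = pvTwoSum l (low + 1) high t := by
              rw [pvTwoSum_step l low high t hlt hlow (by omega), if_neg heq, if_pos hlt2]
            rw [hrw, ih (low + 1) high (by omega) (by omega) hhigh]
            constructor
            · rintro ⟨i, j, h1, h2, h3, h4⟩
              exact ⟨i, j, by omega, h2, h3, h4⟩
            · rintro ⟨i, j, h1, h2, h3, h4⟩
              by_cases hi : low + 1 ≤ (i : Int)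
              · exact ⟨i, j, hi, h2, h3, h4⟩
              · exfalso
                have hieq : i = low.toNat := by omega
                subst hieq
                have hjle : l.getD j 0 ≤ l.getD high.toNat 0 :=
                  pvSorted_getD_mono l hs j high.toNat (by omega) hj0
                omega
          · have hgt : t < l.getD low.toNat 0 + l.getD high.toNat 0 := by omega
            have hnlt : ¬ l.getD low.toNat 0 + l.getD high.toNat 0 < t := by omega
            have hrw : pvTwoSum l low high t = pvTwoSum l low (high - 1) t := by
              rw [pvTwoSum_step l low high t hlt hlow (by omega), if_neg heq, if_neg hnlt]
            rw [hrw, ih low (high - 1) (by omega) hlow (by omega)]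
            constructor
            · rintro ⟨i, j, h1, h2, h3, h4⟩
              exact ⟨i, j, h1, h2, by omega, h4⟩
            · rintro ⟨i, j, h1, h2, h3, h4⟩
              by_cases hj : (j : Int) ≤ high - 1
              · exact ⟨i, j, h1, h2, hj, h4⟩
              · exfalso
                have hjeq : j = high.toNat := by omega
                subst hjeq
                have hile : l.getD low.toNat 0 ≤ l.getD i 0 :=
                  pvSorted_getD_mono l hs low.toNat i (by omega) (by omega)
                omega
      · rw [pvTwoSum, if_neg hlt]
        simp only [Bool.false_eq_true, false_iff]
        rintro ⟨i, j, h1, h2, h3, _⟩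
        omega
  exact main (high - low).toNat low high le_rfl hlow hhigh

-- the recursion is correct for 2 ≤ k (window [low, len-1])
theorem pvIfOr (b c : Bool) : (if b then true else c) = (b || c) := by
  cases b <;> simp

theorem pvE_two_drop (l : List Int) (low t : Int) (hlow : 0 ≤ low) :
    pvE (l.drop low.toNat) 2 t ↔
      ∃ i j : Nat, low ≤ (i : Int) ∧ i < j ∧ (j : Int) ≤ (l.length : Int) - 1 ∧
        l.getD i 0 + l.getD j 0 = t := by
  have hgd : ∀ m : Nat, (l.drop low.toNat).getD m 0 = l.getD (low.toNat + m) 0 := by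
    intro m; simp [List.getD_eq_getElem?_getD, List.getElem?_drop]
  rw [pvE_two_iff]
  constructor
  · rintro ⟨i, j, hij, hj, hsum⟩
    rw [hgd, hgd] at hsum
    refine ⟨low.toNat + i, low.toNat + j, by omega, by omega, ?_, hsum⟩
    have := List.length_drop (l := l) (i := low.toNat)
    omega
  · rintro ⟨i, j, h1, h2, h3, h4⟩
    refine ⟨i - low.toNat, j - low.toNat, by omega, ?_, ?_⟩
    · have := List.length_drop (l := l) (i := low.toNat)
      omega
    · rw [hgd, hgd, show low.toNat + (i - low.toNat) = i from by omega,
        show low.toNat + (j - low.toNat) = j from by omega]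
      exact h4

theorem pvRec_iff (l : List Int) (hs : l.Pairwise (· ≤ ·)) (k : Int) (hk : 2 ≤ k)
    (low t : Int) (hlow : 0 ≤ low) (a : List Int) :
    pvRec l low ((l.length : Int) - 1) k t a = true ↔ pvE (l.drop low.toNat) k t := by
  have main : ∀ (n : Nat) (k : Int), k.toNat ≤ n → 2 ≤ k → ∀ (low t : Int) (a : List Int),
      0 ≤ low →
      (pvRec l low ((l.length : Int) - 1) k t a = true ↔ pvE (l.drop low.toNat) k t) := by
    intro n
    induction n with
    | zero => intro k hkn hk; exact absurd hkn (by omega)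
    | succ n ih =>
      intro k hkn hk low t a hlow
      by_cases hk2 : k = 2
      · subst hk2
        have e : pvRec l low ((l.length : Int) - 1) 2 t a = pvTwoSum l low ((l.length : Int) - 1) t := by
          rw [pvRec]; simp
        rw [e, pvTwoSum_iff l hs low ((l.length : Int) - 1) t hlow (by omega),
          pvE_two_drop l low t hlow]
      · have hk3 : 3 ≤ k := by omega
        have e0 : (k == (0 : Int)) = false := by simp; omega
        have e1 : (k == (1 : Int)) = false := by simp; omega
        have e2 : (k == (2 : Int)) = false := by simp; omega
        have e : pvRec l low ((l.length : Int) - 1) k t a = pvLoop l low ((l.length : Int) - 1) k t a := by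
          rw [pvRec]; simp [e0, e1, e2]
        rw [e]
        have loop : ∀ (m : Nat) (low : Int) (a : List Int), 0 ≤ low →
            ((l.length : Int) - low).toNat ≤ m →
            (pvLoop l low ((l.length : Int) - 1) k t a = true ↔ pvE (l.drop low.toNat) k t) := by
          intro m
          induction m with
          | zero =>
            intro low a hlow hm
            have hnle : ¬ low ≤ (l.length : Int) - 1 := by omega
            rw [pvLoop, if_neg hnle]
            have hdrop : l.drop low.toNat = [] := List.drop_eq_nil_of_le (by omega)
            rw [hdrop]
            simp only [Bool.false_eq_true, false_iff, pvE_nil]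
            omega
          | succ m ihm =>
            intro low a hlow hm
            by_cases hle : low ≤ (l.length : Int) - 1
            · have hln : low.toNat < l.length := by omega
              have hx : (PySem.List.pyGet? l low).getD 0 = l.getD low.toNat 0 := by
                rw [PySem.List.pyGet?_of_nonneg l hlow]
                simp [List.getD_eq_getElem?_getD]
              have hdc : l.drop low.toNat = l.getD low.toNat 0 :: l.drop (low.toNat + 1) := by
                rw [List.drop_eq_getElem_cons hln, List.getD_eq_getElem _ _ hln]
              have h1 : pvRec l (low + 1) ((l.length : Int) - 1) (k - 1)
                    (t - (PySem.List.pyGet? l low).getD 0)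
                    (a ++ [(PySem.List.pyGet? l low).getD 0]) = true ↔
                  pvE (l.drop (low.toNat + 1)) (k - 1) (t - l.getD low.toNat 0) := by
                rw [ih (k - 1) (by omega) (by omega) (low + 1) _ _ (by omega),
                  show (low + 1).toNat = low.toNat + 1 from by omega, hx]
              have h2 : pvLoop l (low + 1) ((l.length : Int) - 1) k t a = true ↔
                  pvE (l.drop (low.toNat + 1)) k t := by
                rw [ihm (low + 1) a (by omega) (by omega),
                  show (low + 1).toNat = low.toNat + 1 from by omega]
              rw [pvLoop, if_pos hle, hdc, pvE_cons, pvIfOr, Bool.or_eq_true, h1, h2]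
            · have hnle := hle
              rw [pvLoop, if_neg hnle]
              have hdrop : l.drop low.toNat = [] := List.drop_eq_nil_of_le (by omega)
              rw [hdrop]
              simp only [Bool.false_eq_true, false_iff, pvE_nil]
              omega
        exact loop ((l.length : Int) - low).toNat low a hlow le_rfl
  exact main k.toNat k le_rfl hk low t a hlow

-- B's reachable set after the whole fold
theorem pvSublist_concat (xs : List Int) (x : Int) (c : List Int) :
    c.Sublist (xs ++ [x]) ↔ c.Sublist xs ∨ ∃ c', c = c' ++ [x] ∧ c'.Sublist xs := by
  rw [List.sublist_append_iff]
  constructor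
  · rintro ⟨r1, r2, rfl, h1, h2⟩
    rcases List.sublist_singleton.mp h2 with rfl | rfl
    · exact Or.inl (by simpa using h1)
    · exact Or.inr ⟨r1, rfl, h1⟩
  · rintro (hc | ⟨c', rfl, hc⟩)
    · exact ⟨c, [], by simp, hc, List.nil_sublist _⟩
    · exact ⟨c', [x], rfl, hc, List.Sublist.refl _⟩

theorem pvReach_mem (l : List Int) (k : Int) (hk : 0 ≤ k) (p : Int × Int) :
    p ∈ l.foldl (pvStep k) (PySem.Set.ofList [((0 : Int), (0 : Int))]) ↔
      ∃ c : List Int, c.Sublist l ∧ p = ((c.length : Int), c.sum) ∧ (c.length : Int) ≤ k := by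
  induction l using List.reverseRecOn generalizing p with
  | nil =>
    simp only [List.foldl_nil, PySem.Set.mem_ofList]
    constructor
    · intro hp
      simp at hp
      exact ⟨[], List.nil_sublist _, by simp [hp], by simpa using hk⟩
    · rintro ⟨c, hc, hp, _⟩
      rw [List.sublist_nil] at hc
      subst hc
      simp at hp ⊢
      exact hp
  | append_singleton xs x ih =>
    rw [List.foldl_append, List.foldl_cons, List.foldl_nil]
    rw [show pvStep k (xs.foldl (pvStep k) (PySem.Set.ofList [((0 : Int), (0 : Int))])) x
        = PySem.Set.update (xs.foldl (pvStep k) (PySem.Set.ofList [((0 : Int), (0 : Int))]))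
          (((xs.foldl (pvStep k) (PySem.Set.ofList [((0 : Int), (0 : Int))])).filter
              (fun p => decide (p.1 < k))).map (fun p => (p.1 + 1, p.2 + x))) from rfl]
    rw [PySem.Set.mem_update]
    constructor
    · rintro (hp | hp)
      · obtain ⟨c, hc, hpc, hck⟩ := (ih p).mp hp
        exact ⟨c, (pvSublist_concat xs x c).mpr (Or.inl hc), hpc, hck⟩
      · rw [List.mem_map] at hp
        obtain ⟨q, hq, hgq⟩ := hp
        rw [List.mem_filter] at hq
        obtain ⟨c, hc, hpc, _⟩ := (ih q).mp hq.1
        have hqk : q.1 < k := by simpa using hq.2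
        refine ⟨c ++ [x], (pvSublist_concat xs x _).mpr (Or.inr ⟨c, rfl, hc⟩), ?_, ?_⟩
        · rw [← hgq, hpc]
          simp
          try omega
        · simp
          rw [hpc] at hqk
          simp at hqk
          omega
    · rintro ⟨c, hc, hpc, hck⟩
      rcases (pvSublist_concat xs x c).mp hc with hcs | ⟨c', rfl, hcs⟩
      · exact Or.inl ((ih p).mpr ⟨c, hcs, hpc, hck⟩)
      · refine Or.inr ?_
        rw [List.mem_map]
        refine ⟨((c'.length : Int), c'.sum), ?_, ?_⟩
        · rw [List.mem_filter]
          refine ⟨(ih _).mpr ⟨c', hcs, rfl, by simp at hck; omega⟩, by simp; simp at hck; omega⟩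
        · rw [hpc]
          simp
          try omega

theorem alt_iff (l : List Int) (k t : Int) (hk : 0 ≤ k) :
    has_k_sum_unoptimized_alt l k t = true ↔ pvE l k t := by
  rw [has_k_sum_unoptimized_alt, if_pos hk]
  rw [PySem.Set.contains_iff, pvReach_mem l k hk ((k, t))]
  constructor
  · rintro ⟨c, hc, hp, _⟩
    rw [Prod.mk.injEq] at hp
    exact ⟨c, hc, hp.1.symm, hp.2.symm⟩
  · rintro ⟨c, hc, hl, hsum⟩
    exact ⟨c, hc, by rw [hl, hsum], by omega⟩

-- ===== VERDICT (by name: the statement is the Claim_ definition above) =====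
theorem has_k_sum_unoptimized_spec : Claim_equal_has_k_sum_unoptimized := by
  intro l k t _
  show has_k_sum_unoptimized l k t = has_k_sum_unoptimized_alt l k t
  by_cases hk : 0 ≤ k
  · rw [Bool.eq_iff_iff, alt_iff l k t hk]
    have hperm : (PySem.List.sorted l (fun x => x) false).Perm l :=
      PySem.List.sorted_perm l (fun x => x) false
    have hpw : (PySem.List.sorted l (fun x => x) false).Pairwise (· ≤ ·) :=
      PySem.List.sorted_pairwise l (fun x => x)
    rw [has_k_sum_unoptimized, if_pos hk]
    show pvRec (PySem.List.sorted l (fun x => x) false) 0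
        (((PySem.List.sorted l (fun x => x) false).length : Int) - 1) k t [] = true ↔ pvE l k t
    by_cases hk0 : k = 0
    · subst hk0
      by_cases ht : t = 0
      · subst ht
        have hA : pvRec (PySem.List.sorted l (fun x => x) false) 0
            (((PySem.List.sorted l (fun x => x) false).length : Int) - 1) 0 0 [] = true := by
          rw [pvRec]; simp
        rw [hA]
        simp only [true_iff]
        exact ⟨[], List.nil_sublist _, by simp, by simp⟩
      · have hA : pvRec (PySem.List.sorted l (fun x => x) false) 0
            (((PySem.List.sorted l (fun x => x) false).length : Int) - 1) 0 t [] = false := by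
          rw [pvRec]
          simp [pvLoop_nonpos _ _ _ _ _ _ le_rfl]
          exact ht
        rw [hA]
        simp only [Bool.false_eq_true, false_iff]
        rintro ⟨c, _, hlen, hsum⟩
        have hc : c = [] := List.length_eq_zero_iff.mp (by omega)
        subst hc
        simp at hsum
        omega
    · by_cases hk1 : k = 1
      · subst hk1
        have hA : pvRec (PySem.List.sorted l (fun x => x) false) 0
            (((PySem.List.sorted l (fun x => x) false).length : Int) - 1) 1 t [] =
            (PySem.List.sorted l (fun x => x) false).contains t := by
          rw [pvRec]; simp
        rw [hA, pvE_one]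
        rw [show ((PySem.List.sorted l (fun x => x) false).contains t = true) ↔
            t ∈ PySem.List.sorted l (fun x => x) false from by simp]
        rw [hperm.mem_iff]
      · have hk2 : 2 ≤ k := by omega
        rw [pvRec_iff (PySem.List.sorted l (fun x => x) false) hpw k hk2 0 t le_rfl []]
        rw [show (0 : Int).toNat = 0 from rfl, List.drop_zero]
        exact pvE_perm hperm k t
  · rw [has_k_sum_unoptimized, if_neg hk, has_k_sum_unoptimized_alt, if_neg hk]
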